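-- pv_equiv track=rewrite | github.com/VladiRashkov/Code-Wars | range_extraction.py | solution
-- ===== SOURCE A (Python) =====
-- def solution(numbers):
--     if not numbers:
--         return ""
--
--     result = []
--     start = numbers[0]
--     prev = numbers[0]
--
--     for i in range(1, len(numbers)):
--         if numbers[i] != prev + 1:
--             if prev == start:
--                 result.append(str(start))
--             elif prev == start + 1:
--                 result.append(str(start))
--                 result.append(str(prev))
--             else:
--                 result.append(f"{start}-{prev}")
--             start = numbers[i]
--         prev = numbers[i]
--
--
--     if prev == start:
--         result.append(str(start))
--     elif prev == start + 1:
--         result.append(str(start))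
--         result.append(str(prev))
--     else:
--         result.append(f"{start}-{prev}")
--
--     return ",".join(result)
-- ===== SOURCE B (Python) =====
-- def solution(numbers):
--     n = len(numbers)
--     # break positions: i+1 is a break if numbers[i+1] is not numbers[i]+1
--     breaks = [i + 1 for i, (a, b) in enumerate(zip(numbers, numbers[1:])) if b != a + 1]
--     bounds = [0] + breaks + [n]
--     pieces = []
--     for lo, hi in zip(bounds, bounds[1:]):
--         seg = numbers[lo:hi]
--         if len(seg) >= 3:
--             pieces.append(f"{seg[0]}-{seg[-1]}")
--         else:
--             pieces.extend(str(v) for v in seg)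
--     return ",".join(pieces)
-- ===== Notes on version B (the rewrite author's own statement) =====
-- stated objective: alternative
-- what changed: B has no running run state at all: it computes the set of break indices by filtering enumerate(zip(numbers, numbers[1:])), turns it into a bounds list, and formats each segment obtained by slicing numbers between adjacent bounds, instead of A's single stateful loop that tracks start/prev and flushes formatted pieces as it goes.
import Mathlib
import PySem

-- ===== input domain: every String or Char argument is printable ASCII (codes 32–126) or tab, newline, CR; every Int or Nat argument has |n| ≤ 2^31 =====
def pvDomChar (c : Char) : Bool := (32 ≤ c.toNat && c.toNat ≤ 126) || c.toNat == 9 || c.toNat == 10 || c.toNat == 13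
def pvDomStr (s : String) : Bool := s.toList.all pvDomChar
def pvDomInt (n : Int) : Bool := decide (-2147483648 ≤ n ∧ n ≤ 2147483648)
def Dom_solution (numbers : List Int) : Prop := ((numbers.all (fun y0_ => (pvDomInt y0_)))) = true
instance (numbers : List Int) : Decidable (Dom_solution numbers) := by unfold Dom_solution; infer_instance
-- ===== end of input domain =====

-- B keeps no running run state: it filters enumerate(zip(numbers, numbers[1:])) into a list
-- of break indices, forms a bounds list, and formats each slice between adjacent bounds
-- (an 'alternative' decomposition, same O(n) cost as A's stateful start/prev loop).

-- ===== PORT A =====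
def solution (numbers : List Int) : String :=
  if numbers = [] then ""
  else
    let start := numbers.headD 0
    let prev := numbers.headD 0
    let s := (PySem.List.pyRange 1 (numbers.length : Int) 1).foldl
      (fun (st : List String × Int × Int) i =>
        let ni := PySem.List.pyGetD numbers i 0
        if ni ≠ st.2.2 + 1 then
          (st.1 ++ (if st.2.2 = st.2.1 then [PySem.Int.toStr st.2.1]
            else if st.2.2 = st.2.1 + 1 then [PySem.Int.toStr st.2.1, PySem.Int.toStr st.2.2]
            else [PySem.Int.toStr st.2.1 ++ "-" ++ PySem.Int.toStr st.2.2]), ni, ni)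
        else (st.1, st.2.1, ni))
      (([] : List String), start, prev)
    String.intercalate "," (s.1 ++ (if s.2.2 = s.2.1 then [PySem.Int.toStr s.2.1]
      else if s.2.2 = s.2.1 + 1 then [PySem.Int.toStr s.2.1, PySem.Int.toStr s.2.2]
      else [PySem.Int.toStr s.2.1 ++ "-" ++ PySem.Int.toStr s.2.2]))

-- ===== PORT B =====
-- B-side helper: format the slice numbers[lo:hi] for one adjacent bounds pair (lo, hi)
def stepB (numbers : List Int) (acc : List String) (p : Int × Int) : List String :=
  let s := PySem.List.slice numbers (some p.1) (some p.2)
  if 3 ≤ s.length then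
    acc ++ [PySem.Int.toStr (s.getD 0 0) ++ "-" ++ PySem.Int.toStr (s.getLastD 0)]
  else acc ++ s.map PySem.Int.toStr

def solution_alt (numbers : List Int) : String :=
  let n : Int := numbers.length
  let breaks := ((PySem.List.enumerate (numbers.zip (PySem.List.slice numbers (some 1) none)) 0).filter
      (fun p => p.2.2 ≠ p.2.1 + 1)).map (fun p => p.1 + 1)
  let bounds := [(0 : Int)] ++ breaks ++ [n]
  String.intercalate "," ((bounds.zip bounds.tail).foldl (stepB numbers) [])

-- ===== PRECONDITION & SPEC =====
def Spec_solution (numbers : List Int) (out : String) : Prop := out = solution_alt numbers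
instance (numbers : List Int) (out : String) : Decidable (Spec_solution numbers out) := by unfold Spec_solution; infer_instance

-- ===== CLAIM (what is proved, stated in full; the proofs are below) =====
def Claim_equal_solution : Prop := ∀ (numbers : List Int), Dom_solution numbers → Spec_solution numbers (solution numbers)

-- ===== LEMMAS AND PROOFS =====

-- shared model: the list of maximal consecutive runs and the per-run formatter
def runsAux (last : Int) (cur : List Int) : List Int → List (List Int)
  | [] => [cur]
  | y :: ys => if y = last + 1 then runsAux y (cur ++ [y]) ys
               else cur :: runsAux y [y] ys

def fmtRun (run : List Int) : List String :=
  if run.length = 1 then [PySem.Int.toStr (run.getD 0 0)]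
  else if run.length = 2 then [PySem.Int.toStr (run.getD 0 0), PySem.Int.toStr (run.getD 1 0)]
  else [PySem.Int.toStr (run.getD 0 0) ++ "-" ++ PySem.Int.toStr (run.getLastD 0)]

-- ---- A-side: the loop computes the runs model ----
def flushA (start prev : Int) : List String :=
  if prev = start then [PySem.Int.toStr start]
  else if prev = start + 1 then [PySem.Int.toStr start, PySem.Int.toStr prev]
  else [PySem.Int.toStr start ++ "-" ++ PySem.Int.toStr prev]

def stepA (st : List String × Int × Int) (ni : Int) : List String × Int × Int :=
  if ni ≠ st.2.2 + 1 then (st.1 ++ flushA st.2.1 st.2.2, ni, ni)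
  else (st.1, st.2.1, ni)

-- the run of consecutive integers from a to b (inclusive)
def seg (a b : Int) : List Int := PySem.List.pyRange a (b + 1) 1

lemma seg_self (a : Int) : seg a a = [a] := by
  rw [seg, PySem.List.pyRange_one_cons (by omega)]
  simp

lemma seg_snoc (a b : Int) (h : a ≤ b) : seg a b ++ [b + 1] = seg a (b + 1) := by
  rw [seg, seg, ← PySem.List.pyRange_one_succ_right (show a ≤ b + 1 by omega)]

lemma flush_eq_fmt (a b : Int) (h : a ≤ b) : flushA a b = fmtRun (seg a b) := by
  rcases eq_or_lt_of_le h with rfl | h1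
  · simp [seg_self, flushA, fmtRun]
  rcases eq_or_lt_of_le (show a + 1 ≤ b by omega) with rfl | h2
  · have hseg : seg a (a + 1) = [a, a + 1] := by
      rw [← seg_snoc a a le_rfl, seg_self]; rfl
    simp [hseg, flushA, fmtRun, show a + 1 ≠ a by omega]
  · have hlen : (seg a b).length = (b + 1 - a).toNat := by
      simp [seg, PySem.List.length_pyRange_one]
    have hne1 : (seg a b).length ≠ 1 := by rw [hlen]; omega
    have hne2 : (seg a b).length ≠ 2 := by rw [hlen]; omega
    have hhead : (seg a b).getD 0 0 = a := by
      rw [seg, PySem.List.pyRange_one_cons (by omega)]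
      simp
    have hlast : (seg a b).getLastD 0 = b := by
      rw [seg, PySem.List.pyRange_one_succ_right (show a ≤ b by omega)]
      simp
    rw [flushA, fmtRun, if_neg hne1, if_neg hne2, hhead, hlast,
      if_neg (show ¬ b = a by omega), if_neg (show ¬ b = a + 1 by omega)]

lemma loop_runs (rest : List Int) : ∀ (res : List String) (start prev : Int), start ≤ prev →
    (rest.foldl stepA (res, start, prev)).1 ++
      flushA (rest.foldl stepA (res, start, prev)).2.1 (rest.foldl stepA (res, start, prev)).2.2
    = res ++ ((runsAux prev (seg start prev) rest).map fmtRun).flatten := by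
  induction rest with
  | nil =>
    intro res start prev h
    simp [runsAux, flush_eq_fmt start prev h]
  | cons y ys ih =>
    intro res start prev h
    by_cases hy : y = prev + 1
    · subst hy
      rw [List.foldl_cons, show stepA (res, start, prev) (prev + 1) = (res, start, prev + 1) by
        simp [stepA]]
      rw [ih res start (prev + 1) (by omega), runsAux, if_pos rfl, seg_snoc start prev h]
    · rw [List.foldl_cons, show stepA (res, start, prev) y = (res ++ flushA start prev, y, y) by
        simp [stepA, hy]]
      rw [ih (res ++ flushA start prev) y y le_rfl, runsAux, if_neg hy]
      simp [flush_eq_fmt start prev h, seg_self]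

lemma solution_cons (x : Int) (xs : List Int) :
    solution (x :: xs) = String.intercalate ","
      ((xs.foldl stepA ([], x, x)).1 ++
        flushA (xs.foldl stepA ([], x, x)).2.1 (xs.foldl stepA ([], x, x)).2.2) := by
  have hfold : (PySem.List.pyRange 1 ((x :: xs).length : Int) 1).foldl
      (fun (st : List String × Int × Int) i => stepA st (PySem.List.pyGetD (x :: xs) i 0))
      (([] : List String), x, x) = xs.foldl stepA ([], x, x) := by
    have := PySem.List.foldl_pyRange_pyGetD (xs := x :: xs) (d := (0 : Int)) (f := stepA)
      (init := (([] : List String), x, x)) (a := 1) (by norm_num)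
    simpa using this
  have h1 : solution (x :: xs) = String.intercalate ","
      (((PySem.List.pyRange 1 ((x :: xs).length : Int) 1).foldl
          (fun (st : List String × Int × Int) i => stepA st (PySem.List.pyGetD (x :: xs) i 0))
          (([] : List String), x, x)).1 ++
        flushA ((PySem.List.pyRange 1 ((x :: xs).length : Int) 1).foldl
          (fun (st : List String × Int × Int) i => stepA st (PySem.List.pyGetD (x :: xs) i 0))
          (([] : List String), x, x)).2.1
          ((PySem.List.pyRange 1 ((x :: xs).length : Int) 1).foldl
          (fun (st : List String × Int × Int) i => stepA st (PySem.List.pyGetD (x :: xs) i 0))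
          (([] : List String), x, x)).2.2) := rfl
  rw [h1, hfold]

-- ---- B-side: bounds/slices compute the same runs model ----

-- absolute break indices of a suffix: off is the index of the next element, prev the one before it
def brks (off prev : Int) : List Int → List Int
  | [] => []
  | y :: ys => (if y ≠ prev + 1 then [off] else []) ++ brks (off + 1) y ys

lemma breaks_eq (xs : List Int) : ∀ (x : Int) (s : Int),
    ((PySem.List.enumerate ((x :: xs).zip xs) s).filter
      (fun p => p.2.2 ≠ p.2.1 + 1)).map (fun p => p.1 + 1) = brks (s + 1) x xs := by
  induction xs with
  | nil => intro x s; simp [PySem.List.enumerate_nil, brks]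
  | cons y ys ih =>
    intro x s
    rw [show (x :: y :: ys).zip (y :: ys) = (x, y) :: (y :: ys).zip ys from rfl,
      PySem.List.enumerate_cons, brks]
    have h := ih y (s + 1)
    simp only [ne_eq, decide_not] at h ⊢
    by_cases hy : y = x + 1
    · subst hy; simp [h]
    · simp [hy, h]

lemma fmt_cases (cur : List Int) (h : cur ≠ []) :
    (if 3 ≤ cur.length then
      [PySem.Int.toStr (cur.getD 0 0) ++ "-" ++ PySem.Int.toStr (cur.getLastD 0)]
     else cur.map PySem.Int.toStr) = fmtRun cur := by
  match cur with
  | [a] => simp [fmtRun]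
  | [a, b] => simp [fmtRun]
  | a :: b :: c :: t => simp [fmtRun]

lemma foldB (numbers : List Int) (ys : List Int) : ∀ (b0 : Nat) (cur : List Int) (prev : Int)
    (acc : List String), cur ≠ [] → numbers.drop b0 = cur ++ ys →
    ((((b0 : Int) :: (brks ((b0 : Int) + cur.length) prev ys ++ [(numbers.length : Int)])).zip
        (brks ((b0 : Int) + cur.length) prev ys ++ [(numbers.length : Int)])).foldl
      (stepB numbers) acc)
    = acc ++ ((runsAux prev cur ys).map fmtRun).flatten := by
  induction ys with
  | nil =>
    intro b0 cur prev acc hne hdrop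
    have hb0 : b0 ≤ numbers.length := by
      by_contra hlt
      simp [List.drop_eq_nil_of_le (le_of_not_ge hlt)] at hdrop
      exact hne (by simpa using hdrop.symm)
    have hlen : (numbers.drop b0).length = numbers.length - b0 := by simp
    have hcl : cur.length = numbers.length - b0 := by
      rw [hdrop] at hlen; simpa using hlen
    have hslice : PySem.List.slice numbers (some (b0 : Int)) (some (numbers.length : Int)) = cur := by
      rw [PySem.List.slice_natCast, hdrop]
      simp [hcl]
    have hstep : stepB numbers acc ((b0 : Int), (numbers.length : Int)) = acc ++ fmtRun cur := by
      have hf := fmt_cases cur hne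
      simp only [stepB, hslice]
      split_ifs at hf ⊢ with h3 <;> rw [← hf]
    simp only [brks, List.nil_append]
    rw [show ((b0 : Int) :: [(numbers.length : Int)]).zip [(numbers.length : Int)]
        = [((b0 : Int), (numbers.length : Int))] from rfl]
    rw [List.foldl_cons, List.foldl_nil, hstep]
    simp [runsAux]
  | cons y ys ih =>
    intro b0 cur prev acc hne hdrop
    by_cases hy : y = prev + 1
    · have hdrop' : numbers.drop b0 = (cur ++ [y]) ++ ys := by
        rw [hdrop]; simp
      have hrec := ih b0 (cur ++ [y]) y acc (by simp) hdrop'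
      rw [show ((b0 : Int) + ((cur ++ [y]).length : Int)) = (b0 : Int) + (cur.length : Int) + 1 by
        push_cast [List.length_append, List.length_cons, List.length_nil]; ring] at hrec
      rw [brks, if_neg (by simp [hy]), List.nil_append, runsAux, if_pos hy]
      exact hrec
    · have hdrop2 : numbers.drop (b0 + cur.length) = y :: ys := by
        rw [← List.drop_drop, hdrop]; simp
      have hslice : PySem.List.slice numbers (some (b0 : Int))
          (some ((b0 : Int) + (cur.length : Int))) = cur := by
        rw [PySem.List.slice_natCast_add, hdrop]
        simp
      have hstep : stepB numbers acc ((b0 : Int), (b0 : Int) + (cur.length : Int))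
          = acc ++ fmtRun cur := by
        have hf := fmt_cases cur hne
        simp only [stepB, hslice]
        split_ifs at hf ⊢ with h3 <;> rw [← hf]
      have hrec := ih (b0 + cur.length) [y] y (acc ++ fmtRun cur) (by simp) (by simpa using hdrop2)
      push_cast [List.length_cons, List.length_nil] at hrec
      rw [brks, if_pos hy]
      simp only [List.cons_append, List.nil_append, List.zip_cons_cons, List.foldl_cons]
      rw [hstep, hrec, runsAux, if_neg hy]
      simp

lemma alt_cons (x : Int) (xs : List Int) :
    solution_alt (x :: xs)
    = String.intercalate "," (((runsAux x [x] xs).map fmtRun).flatten) := by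
  rw [solution_alt]
  simp only [PySem.List.slice_from_one, List.tail_cons]
  rw [breaks_eq xs x 0]
  have h := foldB (x :: xs) xs 0 [x] x [] (by simp) (by simp)
  refine congrArg (String.intercalate ",") ?_
  simpa [List.cons_append, List.nil_append] using h

-- ===== VERDICT (by name: the statement is the Claim_ definition above) =====
theorem solution_spec : Claim_equal_solution := by
  intro numbers _
  unfold Spec_solution
  cases numbers with
  | nil => rfl
  | cons x xs =>
    rw [solution_cons, loop_runs xs [] x x le_rfl, seg_self, alt_cons]
    rfl
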